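-- pv_equiv track=rewrite | github.com/heylixiang/pyrunner-mcp | src/lib/python_executor/security.py | check_import_authorized
-- ===== SOURCE A (Python) =====
-- from typing import Any
--
-- def build_import_tree(authorized_imports: list[str]) -> dict[str, Any]:
--     tree: dict[str, Any] = {}
--     for import_path in authorized_imports:
--         parts = import_path.split(".")
--         current = tree
--         for part in parts:
--             current = current.setdefault(part, {})
--     return tree
--
-- def check_import_authorized(import_to_check: str, authorized_imports: list[str]) -> bool:
--     current_node = build_import_tree(authorized_imports)
--     for part in import_to_check.split("."):
--         if "*" in current_node:
--             return True
--         if part not in current_node: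
--             return False
--         current_node = current_node[part]
--     return True
-- ===== SOURCE B (Python) =====
-- def check_import_authorized(import_to_check: str, authorized_imports: list[str]) -> bool:
--     check_parts = import_to_check.split(".")
--     for authorized in authorized_imports:
--         auth_parts = authorized.split(".")
--         matched = True
--         for i, part in enumerate(check_parts):
--             if i >= len(auth_parts):
--                 matched = False
--                 break
--             if auth_parts[i] == "*":
--                 return True
--             if auth_parts[i] != part:
--                 matched = False
--                 break
--         if matched:
--             return True
--     return False
-- ===== Notes on version B (the rewrite author's own statement) =====
-- stated objective: simpler
-- what changed: Dropped build_import_tree and its nested-dict trie entirely: B compares the dot-split check path directly against each authorized import, part by part, returning True on a wildcard or a full prefix match.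
import Mathlib
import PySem

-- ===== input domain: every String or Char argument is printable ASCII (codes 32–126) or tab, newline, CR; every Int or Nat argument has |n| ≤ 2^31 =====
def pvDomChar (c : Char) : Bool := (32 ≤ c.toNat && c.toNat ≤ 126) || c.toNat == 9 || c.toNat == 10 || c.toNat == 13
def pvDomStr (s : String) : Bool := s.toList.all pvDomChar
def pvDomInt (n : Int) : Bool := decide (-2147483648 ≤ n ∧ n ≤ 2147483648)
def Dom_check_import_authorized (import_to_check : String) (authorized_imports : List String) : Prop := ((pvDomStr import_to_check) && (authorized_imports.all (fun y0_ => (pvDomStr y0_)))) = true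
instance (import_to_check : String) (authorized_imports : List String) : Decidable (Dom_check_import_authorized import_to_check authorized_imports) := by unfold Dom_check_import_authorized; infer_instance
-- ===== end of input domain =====

-- B drops build_import_tree's nested-dict trie and instead matches the dot-split check path
-- directly against each authorized import, part by part (objective: simpler).


-- s.split(".") — sep is ".", never empty, so split? always returns some
def pySplitDot (s : String) : List String := (PySem.Str.split? s ".").getD []

-- ===== PORT A =====
-- Python's recursively nested dict[str, Any] is ported as an explicit trie
-- (a nested inductive is not allowed, so children are a mutual assoc-list type
-- keeping dict insertion order; setdefault appends a fresh empty child at the end).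
mutual
inductive PvTree where
  | node : PvTreeL → PvTree
  deriving DecidableEq
inductive PvTreeL where
  | nil : PvTreeL
  | cons : String → PvTree → PvTreeL → PvTreeL
  deriving DecidableEq
end

def pvEmptyTree : PvTree := PvTree.node PvTreeL.nil

-- "*" in current_node / current_node[part] (dict membership / lookup, first match)
def pvHasKey (k : String) : PvTreeL → Bool
  | PvTreeL.nil => false
  | PvTreeL.cons k' _ rest => if k' = k then true else pvHasKey k rest

def pvLookup (k : String) : PvTreeL → Option PvTree
  | PvTreeL.nil => none
  | PvTreeL.cons k' t rest => if k' = k then some t else pvLookup k rest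

-- current.setdefault(part, {}) applied along a path: f is the insertion into the subtree
def pvUpdL (f : PvTree → PvTree) (p : String) : PvTreeL → PvTreeL
  | PvTreeL.nil => PvTreeL.cons p (f pvEmptyTree) PvTreeL.nil
  | PvTreeL.cons k t rest =>
      if k = p then PvTreeL.cons k (f t) rest else PvTreeL.cons k t (pvUpdL f p rest)

-- the inner 'for part in parts: current = current.setdefault(part, {})' loop
def pvInsertPath : List String → PvTree → PvTree
  | [], t => t
  | p :: ps, PvTree.node l => PvTree.node (pvUpdL (pvInsertPath ps) p l)

def build_import_tree (authorized_imports : List String) : PvTree :=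
  authorized_imports.foldl (fun tree import_path => pvInsertPath (pySplitDot import_path) tree) pvEmptyTree

-- the 'for part in import_to_check.split(".")' walk of A
def pvCheckTree : List String → PvTree → Bool
  | [], _ => true
  | part :: parts, PvTree.node l =>
      if pvHasKey "*" l then true
      else match pvLookup part l with
        | none => false
        | some t => pvCheckTree parts t

def check_import_authorized (import_to_check : String) (authorized_imports : List String) : Bool :=
  pvCheckTree (pySplitDot import_to_check) (build_import_tree authorized_imports)

-- ===== PORT B =====
-- B's inner index loop over check_parts against auth_parts
def pvMatchParts : List String → List String → Bool
  | [], _ => true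
  | _ :: _, [] => false
  | c :: cs, a :: as_ =>
      if a = "*" then true
      else if a = c then pvMatchParts cs as_
      else false

def check_import_authorized_alt (import_to_check : String) (authorized_imports : List String) : Bool :=
  let check_parts := pySplitDot import_to_check
  authorized_imports.any (fun authorized => pvMatchParts check_parts (pySplitDot authorized))

-- ===== PRECONDITION & SPEC =====
def Spec_check_import_authorized (import_to_check : String) (authorized_imports : List String) (out : Bool) : Prop := out = check_import_authorized_alt import_to_check authorized_imports
instance (import_to_check : String) (authorized_imports : List String) (out : Bool) : Decidable (Spec_check_import_authorized import_to_check authorized_imports out) := by unfold Spec_check_import_authorized; infer_instance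

-- ===== CLAIM (what is proved, stated in full; the proofs are below) =====
def Claim_equal_check_import_authorized : Prop := ∀ (import_to_check : String) (authorized_imports : List String), Dom_check_import_authorized import_to_check authorized_imports → Spec_check_import_authorized import_to_check authorized_imports (check_import_authorized import_to_check authorized_imports)

-- ===== LEMMAS AND PROOFS =====

theorem pvHasKey_updL (k p : String) (f : PvTree → PvTree) :
    ∀ (l : PvTreeL), pvHasKey k (pvUpdL f p l) = (pvHasKey k l || (p = k))
  | PvTreeL.nil => by simp [pvUpdL, pvHasKey]
  | PvTreeL.cons k' t rest => by
      simp only [pvUpdL]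
      by_cases h1 : k' = p
      · rw [if_pos h1]; subst h1
        simp only [pvHasKey]
        by_cases h2 : k' = k <;> simp [h2]
      · rw [if_neg h1]
        simp only [pvHasKey, pvHasKey_updL k p f rest]
        by_cases h2 : k' = k <;> simp [h2, Bool.or_assoc]

theorem pvLookup_updL_self (p : String) (f : PvTree → PvTree) :
    ∀ (l : PvTreeL), pvLookup p (pvUpdL f p l) = some (f ((pvLookup p l).getD pvEmptyTree))
  | PvTreeL.nil => by simp [pvUpdL, pvLookup]
  | PvTreeL.cons k t rest => by
      simp only [pvUpdL]
      by_cases h : k = p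
      · rw [if_pos h]; simp [pvLookup, h]
      · rw [if_neg h]; simp [pvLookup, h, pvLookup_updL_self p f rest]

theorem pvLookup_updL_ne (k p : String) (h : k ≠ p) (f : PvTree → PvTree) :
    ∀ (l : PvTreeL), pvLookup k (pvUpdL f p l) = pvLookup k l
  | PvTreeL.nil => by simp [pvUpdL, pvLookup, Ne.symm h]
  | PvTreeL.cons k' t rest => by
      simp only [pvUpdL]
      by_cases h1 : k' = p
      · rw [if_pos h1]
        have h2 : ¬ k' = k := by rw [h1]; exact Ne.symm h
        simp [pvLookup, h2]
      · rw [if_neg h1]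
        simp only [pvLookup]
        by_cases h2 : k' = k <;> simp [h2, pvLookup_updL_ne k p h f rest]

theorem pvCheckTree_empty (cs : List String) (h : cs ≠ []) :
    pvCheckTree cs pvEmptyTree = false := by
  cases cs with
  | nil => exact absurd rfl h
  | cons c cs => simp [pvCheckTree, pvEmptyTree, pvHasKey, pvLookup]

-- the key invariant: checking against an updated trie = match the inserted path, or check the old trie
theorem pvCheckTree_insertPath (ps : List String) :
    ∀ (t : PvTree) (cs : List String),
      pvCheckTree cs (pvInsertPath ps t) = (pvMatchParts cs ps || pvCheckTree cs t) := by
  induction ps with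
  | nil =>
      intro t cs
      cases cs with
      | nil => simp [pvCheckTree, pvMatchParts]
      | cons c cs => simp [pvInsertPath, pvMatchParts]
  | cons p ps ih =>
      intro t cs
      obtain ⟨l⟩ := t
      cases cs with
      | nil => simp [pvCheckTree, pvMatchParts]
      | cons c cs =>
          by_cases hstar : p = "*"
          · subst hstar
            simp [pvInsertPath, pvCheckTree, pvMatchParts, pvHasKey_updL]
          · by_cases hl : pvHasKey "*" l = true
            · simp [pvInsertPath, pvCheckTree, pvMatchParts, pvHasKey_updL, hl, hstar]
            · simp only [Bool.not_eq_true] at hl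
              by_cases hc : p = c
              · subst hc
                simp only [pvInsertPath, pvCheckTree, pvHasKey_updL, hl, hstar,
                  Bool.false_or, decide_eq_true_eq,
                  pvLookup_updL_self, pvMatchParts]
                rw [ih]
                cases hlk : pvLookup p l with
                | none =>
                    cases cs with
                    | nil => simp [pvMatchParts, pvCheckTree]
                    | cons c' cs' => simp [pvCheckTree_empty]
                | some t' => simp
              · have hc' : c ≠ p := fun h => hc h.symm
                have hm : pvMatchParts (c :: cs) (p :: ps) = false := by
                  simp [pvMatchParts, hstar, hc]
                simp [pvInsertPath, pvCheckTree, pvHasKey_updL, hl, hstar, hm,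
                  pvLookup_updL_ne c p hc']

theorem pvCheckTree_foldl (cs : List String) :
    ∀ (auths : List String) (t : PvTree),
      pvCheckTree cs (auths.foldl (fun tree a => pvInsertPath (pySplitDot a) tree) t)
        = (auths.any (fun a => pvMatchParts cs (pySplitDot a)) || pvCheckTree cs t) := by
  intro auths
  induction auths with
  | nil => intro t; simp
  | cons a as ih =>
      intro t
      simp only [List.foldl_cons, List.any_cons, ih, pvCheckTree_insertPath]
      cases pvMatchParts cs (pySplitDot a) <;> simp

theorem pvSplitGo_ne_nil (sep : List Char) :
    ∀ (fuel : Nat) (l cur : List Char) (acc : List (List Char)),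
      PySem.Chars.splitOn.go sep fuel l cur acc ≠ [] := by
  intro fuel
  induction fuel with
  | zero => intro l cur acc; simp [PySem.Chars.splitOn.go]
  | succ n ih =>
      intro l cur acc
      cases l with
      | nil => simp [PySem.Chars.splitOn.go]
      | cons c rest =>
          rw [PySem.Chars.splitOn.go]
          split
          · exact ih _ _ _
          · exact ih _ _ _

theorem pySplitDot_ne_nil (s : String) : pySplitDot s ≠ [] := by
  have h2 : PySem.Chars.splitOn s.toList ".".toList ≠ [] := by
    rw [PySem.Chars.splitOn]; exact pvSplitGo_ne_nil _ _ _ _ _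
  have h1 : PySem.Chars.split? s.toList ".".toList
      = some (PySem.Chars.splitOn s.toList ".".toList) := by
    simp [PySem.Chars.split?]
  unfold pySplitDot PySem.Str.split?
  rw [h1]
  simpa using h2

theorem check_import_authorized_eq (import_to_check : String) (authorized_imports : List String) :
    check_import_authorized import_to_check authorized_imports
      = check_import_authorized_alt import_to_check authorized_imports := by
  unfold check_import_authorized check_import_authorized_alt build_import_tree
  rw [pvCheckTree_foldl _,
    pvCheckTree_empty _ (pySplitDot_ne_nil _)]
  simp

-- ===== VERDICT (by name: the statement is the Claim_ definition above) =====
theorem check_import_authorized_spec : Claim_equal_check_import_authorized := by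
  intro imp auths _
  exact check_import_authorized_eq imp auths
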